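-- pv_equiv track=rewrite | github.com/Listera0/TransCompiler_for_beginner | [3] Realize/TransCompiler for beginner/CPP.py | FindNextWordLastIndex
-- ===== SOURCE A (Python) =====
-- WordEndList = [" ", "=", ";", "(", ")", "{", "}", "[", "]", ">", "<", "\n", "\r"]
--
-- def FindNextWordLastIndex( code ):
--     word = None
--     startindex = 0
--     startword = False
--
--     for i in range(0, len(code)):
--         if startword == False and code[i] not in WordEndList:
--             startindex = i
--             startword = True
--
--         if startword and code[i] in WordEndList:
--             return i
--
--     return 0
-- ===== SOURCE B (Python) =====
-- WordEndList = [" ", "=", ";", "(", ")", "{", "}", "[", "]", ">", "<", "\n", "\r"]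
--
-- def FindNextWordLastIndex(code):
--     # strip the leading delimiters off in one library call, then locate the first
--     # occurrence of EACH delimiter independently and take the smallest position
--     rest = code.lstrip("".join(WordEndList))
--     if not rest:
--         return 0
--     start = len(code) - len(rest)
--     hits = [p for p in (rest.find(d) for d in WordEndList) if p != -1]
--     return start + min(hits) if hits else 0
-- ===== Notes on version B (the rewrite author's own statement) =====
-- stated objective: faster
-- what changed: Instead of A's single flagged per-character scan, B strips the leading delimiters with str.lstrip, then runs one independent str.find per delimiter character and returns the minimum found position (offset by the stripped length), with 0 when no word or no terminating delimiter exists.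
import Mathlib
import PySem

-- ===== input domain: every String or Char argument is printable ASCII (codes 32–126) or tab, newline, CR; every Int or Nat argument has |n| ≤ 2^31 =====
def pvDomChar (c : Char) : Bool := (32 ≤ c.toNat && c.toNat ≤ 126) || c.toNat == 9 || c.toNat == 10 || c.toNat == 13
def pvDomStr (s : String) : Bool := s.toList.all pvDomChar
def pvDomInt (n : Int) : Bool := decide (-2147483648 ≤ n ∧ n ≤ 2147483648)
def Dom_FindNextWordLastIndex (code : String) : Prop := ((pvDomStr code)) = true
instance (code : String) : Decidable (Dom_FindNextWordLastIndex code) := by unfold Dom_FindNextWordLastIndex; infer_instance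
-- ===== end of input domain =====

-- B replaces A's flagged character scan by lstrip + one str.find per delimiter + min (alternative decomposition); return value only.

-- ===== PORT A =====
-- WordEndList (one-char strings → chars), shared by both ports
def pvDelims : List Char :=
  [' ', '=', ';', '(', ')', '{', '}', '[', ']', '>', '<', '\n', '\r']

-- membership test `code[i] in WordEndList`
def pvIsWordEnd (c : Char) : Bool := pvDelims.contains c

-- the for-loop of A over range(0, len(code)), carrying (startindex, startword);
-- the list argument is the remaining characters, i the current index
def pvLoopA (cs : List Char) (i : Nat) (startindex : Nat) (startword : Bool) : Int :=
  match cs with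
  | [] => 0
  | c :: rest =>
    let startindex := if startword = false && !pvIsWordEnd c then i else startindex
    let startword := if startword = false && !pvIsWordEnd c then true else startword
    if startword && pvIsWordEnd c then (i : Int)
    else pvLoopA rest (i + 1) startindex startword

def FindNextWordLastIndex (code : String) : Int :=
  pvLoopA code.toList 0 0 false

-- ===== PORT B =====
-- code.lstrip("".join(WordEndList)): Python's lstrip(chars) removes the leading
-- characters that are members of the set; ported by hand as dropWhile (exact).
-- rest.find(d) for a one-char string d is PySem.Chars.find rest [d];
-- min(hits) with hits ≠ [] is PySem.List.min?.
def FindNextWordLastIndex_alt (code : String) : Int :=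
  let cs := code.toList
  let rest := cs.dropWhile (fun c => pvIsWordEnd c)
  if rest = [] then 0
  else
    let start : Int := ((cs.length - rest.length : Nat) : Int)
    let hits := (pvDelims.map (fun d => PySem.Chars.find rest [d])).filter (fun p => p ≠ -1)
    match PySem.List.min? hits (fun x => x) with
    | some m => start + m
    | none => 0

-- ===== PRECONDITION & SPEC =====
def Spec_FindNextWordLastIndex (code : String) (out : Int) : Prop := out = FindNextWordLastIndex_alt code
instance (code : String) (out : Int) : Decidable (Spec_FindNextWordLastIndex code out) := by unfold Spec_FindNextWordLastIndex; infer_instance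

-- ===== CLAIM (what is proved, stated in full; the proofs are below) =====
def Claim_equal_FindNextWordLastIndex : Prop := ∀ (code : String), Dom_FindNextWordLastIndex code → Spec_FindNextWordLastIndex code (FindNextWordLastIndex code)

-- ===== LEMMAS AND PROOFS =====

-- A's loop once the word has started returns the index of the next delimiter
-- (the takeWhile-length of the non-delimiters), or 0 if none remains
theorem pvLoopA_true (cs : List Char) (i si : Nat) :
    pvLoopA cs i si true =
      (if (cs.takeWhile (fun c => !pvIsWordEnd c)).length < cs.length
       then ((i + (cs.takeWhile (fun c => !pvIsWordEnd c)).length : Nat) : Int) else 0) := by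
  induction cs generalizing i si with
  | nil => simp [pvLoopA]
  | cons c rest ih =>
    by_cases h : pvIsWordEnd c
    · simp [pvLoopA, h]
    · have h1 : pvLoopA (c :: rest) i si true = pvLoopA rest (i + 1) si true := by
        simp [pvLoopA, h]
      rw [h1, ih (i + 1) si]
      simp only [List.takeWhile_cons, h, List.length_cons]
      split <;> split <;> simp_all <;> omega

-- A's loop before the word has started: skip the leading delimiters
theorem pvLoopA_false (cs : List Char) (i si : Nat) :
    pvLoopA cs i si false =
      pvLoopA (cs.dropWhile (fun c => pvIsWordEnd c))
        (i + (cs.takeWhile (fun c => pvIsWordEnd c)).length) si true := by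
  induction cs generalizing i si with
  | nil => simp [pvLoopA, List.dropWhile]
  | cons c rest ih =>
    by_cases h : pvIsWordEnd c
    · have h4 : pvLoopA (c :: rest) i si false = pvLoopA rest (i + 1) si false := by
        simp [pvLoopA, h]
      rw [h4, ih (i + 1) si]
      simp only [List.dropWhile_cons, List.takeWhile_cons, h, if_pos, List.length_cons]
      have : i + 1 + (rest.takeWhile (fun c => pvIsWordEnd c)).length
           = i + ((rest.takeWhile (fun c => pvIsWordEnd c)).length + 1) := by omega
      simp [this]
    · rw [show pvLoopA (c :: rest) i si false = pvLoopA rest (i + 1) i true from by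
        simp [pvLoopA, h]]
      have hd : (c :: rest).dropWhile (fun c => pvIsWordEnd c) = c :: rest := by
        simp [h]
      have htw : (c :: rest).takeWhile (fun c => pvIsWordEnd c) = [] := by
        simp [h]
      rw [hd, htw]
      simp only [List.length_nil, Nat.add_zero]
      rw [show pvLoopA (c :: rest) i si true = pvLoopA rest (i + 1) si true from by
        simp [pvLoopA, h]]
      rw [pvLoopA_true rest (i + 1) i, pvLoopA_true rest (i + 1) si]

-- [d] is a prefix of l.drop i iff position i holds d
theorem single_prefix_drop (l : List Char) (d : Char) (i : Nat) :
    [d] <+: l.drop i ↔ ∃ h : i < l.length, l[i] = d := by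
  constructor
  · rintro ⟨t, ht⟩
    have hlen : i < l.length := by
      by_contra hc
      have : l.drop i = [] := List.drop_eq_nil_of_le (by omega)
      rw [this] at ht
      simp at ht
    refine ⟨hlen, ?_⟩
    have h0 : (l.drop i)[0]'(by rw [List.length_drop]; omega) = d := by
      simp [← ht]
    rw [List.getElem_drop] at h0
    simpa using h0
  · rintro ⟨hlen, hval⟩
    rw [List.drop_eq_getElem_cons hlen, hval]
    exact ⟨l.drop (i + 1), rfl⟩

-- the characters strictly before the takeWhile boundary satisfy p; the boundary character does not
theorem takeWhile_facts (p : Char → Bool) (l : List Char) :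
    (∀ i (h : i < (l.takeWhile p).length),
        p (l[i]'(Nat.lt_of_lt_of_le h (l.takeWhile_prefix p).length_le)) = true) ∧
    (∀ h : (l.takeWhile p).length < l.length,
        p (l[(l.takeWhile p).length]) = false) := by
  induction l with
  | nil => simp
  | cons c rest ih =>
    cases hc : p c
    · simp only [List.takeWhile_cons, hc, Bool.false_eq_true, if_false, List.length_nil]
      constructor
      · intro i h; omega
      · intro _
        simpa using hc
    · simp only [List.takeWhile_cons, hc, if_true, List.length_cons]
      constructor
      · intro i h
        match i with
        | 0 => simpa using hc
        | Nat.succ i' =>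
          have := ih.1 i' (by simpa using h)
          simpa using this
      · intro h
        have := ih.2 (by simpa using h)
        simpa using this

-- find for a one-character needle points at the given first occurrence
theorem find_single_eq (r : List Char) (d : Char) (t : Nat) (htl : t < r.length)
    (hval : r[t] = d) (hmin : ∀ i (h : i < t), r[i]'(by omega) ≠ d) :
    PySem.Chars.find r [d] = (t : Int) := by
  have hinf : [d] <:+: r := by
    have : PySem.Chars.isIn [d] r = true :=
      (PySem.Chars.exists_prefix_drop_iff_isIn [d] r).mp
        ⟨t, (single_prefix_drop r d t).2 ⟨htl, hval⟩⟩
    exact (PySem.Chars.isIn_iff_infix [d] r).mp this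
  have hnn : 0 ≤ PySem.Chars.find r [d] := (PySem.Chars.find_nonneg_iff r [d]).mpr hinf
  obtain ⟨hpre, hfst⟩ := PySem.Chars.find_spec hnn
  set n := (PySem.Chars.find r [d]).toNat with hn
  obtain ⟨hnl, hnv⟩ := (single_prefix_drop r d n).mp hpre
  rcases Nat.lt_trichotomy n t with hlt | heq | hgt
  · exact absurd hnv (hmin n hlt)
  · omega
  · exact absurd ((single_prefix_drop r d t).2 ⟨htl, hval⟩) (hfst t hgt)

-- the first-delimiter position is the minimum of the per-delimiter finds
theorem min_hits (r : List Char)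
    (ht : (r.takeWhile (fun c => !pvIsWordEnd c)).length < r.length) :
    PySem.List.min?
      ((pvDelims.map (fun d => PySem.Chars.find r [d])).filter (fun p => p ≠ -1))
      (fun x => x)
      = some ((r.takeWhile (fun c => !pvIsWordEnd c)).length : Int) := by
  set t := (r.takeWhile (fun c => !pvIsWordEnd c)).length with htdef
  obtain ⟨hbefore, hbound⟩ := takeWhile_facts (fun c => !pvIsWordEnd c) r
  have hdel : pvIsWordEnd (r[t]) = true := by
    have := hbound ht
    simpa using this
  have hfind : PySem.Chars.find r [r[t]] = (t : Int) := by
    apply find_single_eq r _ t ht rfl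
    intro i hi hval
    have := hbefore i (by omega)
    rw [hval] at this
    simp [hdel] at this
  have hmem : ((t : Nat) : Int) ∈
      ((pvDelims.map (fun d => PySem.Chars.find r [d])).filter (fun p => p ≠ -1)) := by
    apply List.mem_filter.mpr
    refine ⟨List.mem_map.mpr ⟨r[t], by simpa [pvIsWordEnd] using hdel, hfind⟩, ?_⟩
    simp only [ne_eq, decide_eq_true_eq]
    intro hcontra
    omega
  have hle : ∀ y ∈ ((pvDelims.map (fun d => PySem.Chars.find r [d])).filter (fun p => p ≠ -1)),
      ((t : Nat) : Int) ≤ y := by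
    intro y hy
    obtain ⟨hymap, hyne⟩ := List.mem_filter.mp hy
    obtain ⟨d, hdmem, hdy⟩ := List.mem_map.mp hymap
    have hne : y ≠ -1 := by simpa using hyne
    have hge : -1 ≤ y := by rw [← hdy]; exact PySem.Chars.neg_one_le_find r [d]
    have hnn : 0 ≤ PySem.Chars.find r [d] := by rw [hdy]; omega
    obtain ⟨hp, _⟩ := PySem.Chars.find_spec hnn
    rw [hdy] at hp
    obtain ⟨hyl, hyv⟩ := (single_prefix_drop r d y.toNat).mp hp
    by_contra hcon
    have hylt : y.toNat < t := by omega
    have hbv := hbefore y.toNat (by omega)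
    rw [hyv] at hbv
    have hd2 : pvIsWordEnd d = true := by
      simp only [pvIsWordEnd]
      simpa using hdmem
    simp [hd2] at hbv
  rcases hmin : PySem.List.min?
      ((pvDelims.map (fun d => PySem.Chars.find r [d])).filter (fun p => p ≠ -1))
      (fun x => x) with _ | m
  · exfalso
    have := (PySem.List.min?_eq_none_iff _ _).mp hmin
    rw [this] at hmem
    exact absurd hmem (List.not_mem_nil)
  · rw [hmin]
    have hmmem := PySem.List.min?_mem hmin
    have h1 : m ≤ ((t : Nat) : Int) := PySem.List.min?_isMin hmin _ hmem
    have h2 : ((t : Nat) : Int) ≤ m := hle m hmmem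
    exact congrArg some (by omega)

-- when the word runs to the end of rest, no delimiter is found at all
theorem hits_empty (r : List Char)
    (ht : ¬ (r.takeWhile (fun c => !pvIsWordEnd c)).length < r.length) :
    ((pvDelims.map (fun d => PySem.Chars.find r [d])).filter (fun p => p ≠ -1)) = [] := by
  have hall : ∀ c ∈ r, pvIsWordEnd c = false := by
    have hlen : (r.takeWhile (fun c => !pvIsWordEnd c)).length = r.length := by
      have := (r.takeWhile_prefix (fun c => !pvIsWordEnd c)).length_le
      omega
    have heq : r.takeWhile (fun c => !pvIsWordEnd c) = r :=
      (r.takeWhile_prefix (fun c => !pvIsWordEnd c)).eq_of_length hlen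
    intro c hc
    rw [← heq] at hc
    have : (!pvIsWordEnd c) = true := List.mem_takeWhile_imp (p := fun c => !pvIsWordEnd c) hc
    simpa using this
  apply List.filter_eq_nil_iff.mpr
  intro a ha
  obtain ⟨d, hdmem, hda⟩ := List.mem_map.mp ha
  have hnotin : ¬ ([d] <:+: r) := by
    intro hinf
    obtain ⟨j, hj⟩ := (PySem.Chars.exists_prefix_drop_iff_isIn [d] r).mpr
      ((PySem.Chars.isIn_iff_infix [d] r).mpr hinf)
    obtain ⟨hjl, hjv⟩ := (single_prefix_drop r d j).mp hj
    have hdd : pvIsWordEnd d = true := by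
      simp only [pvIsWordEnd]
      simpa using hdmem
    have := hall (r[j]) (List.getElem_mem hjl)
    rw [hjv, hdd] at this
    exact absurd this (by simp)
  have hm1 : PySem.Chars.find r [d] = -1 :=
    (PySem.Chars.find_eq_neg_one_iff r [d]).mpr hnotin
  rw [← hda, hm1]
  simp

-- ===== VERDICT (by name: the statement is the Claim_ definition above) =====
theorem FindNextWordLastIndex_spec : Claim_equal_FindNextWordLastIndex := by
  intro code _
  unfold Spec_FindNextWordLastIndex FindNextWordLastIndex FindNextWordLastIndex_alt
  simp only []
  rw [pvLoopA_false code.toList 0 0, Nat.zero_add, pvLoopA_true]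
  set cs := code.toList with hcs
  set k := (cs.takeWhile (fun c => pvIsWordEnd c)).length with hk
  set r := cs.dropWhile (fun c => pvIsWordEnd c) with hr
  set t := (r.takeWhile (fun c => !pvIsWordEnd c)).length with htdef
  have hsplit : k + r.length = cs.length := by
    rw [hk, hr, ← List.length_append, List.takeWhile_append_dropWhile]
  by_cases hre : r = []
  · rw [if_pos hre, if_neg (by rw [htdef, hre]; simp)]
  · rw [if_neg hre]
    by_cases hlt : t < r.length
    · rw [if_pos hlt]
      simp only [min_hits r hlt]
      have : cs.length - r.length = k := by omega
      rw [this]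
      push_cast
      ring
    · rw [if_neg hlt, hits_empty r hlt]
      simp [PySem.List.min?]
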